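-- pv_equiv track=rewrite | github.com/Itogab/tp_sintaxis_lexer | Automatas/Espacio_en_blanco.py | espacio_en_blanco
-- ===== SOURCE A (Python) =====
-- ESTADO_FINAL = "ESTADO FINAL"
--
-- ESTADO_NO_FINAL = "NO ACEPTADO"
--
-- ESTADO_TRAMPA = "EN ESTADO TRAMPA"
--
-- def espacio_en_blanco(lexema):
--     estado=0
--     estados_finales = [1]
--     delta= {0:{'\t':1,' ':1,'\n':1},1:{'\t':1,' ':1,'\n':1}}
--
--     for caracter in lexema:
--         if caracter in delta[estado].keys():
--             estado=delta[estado][caracter]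
--         else:
--             estado = -1
--             break
--     if estado == -1:
--         return ESTADO_TRAMPA
--     if estado in estados_finales:
--         return ESTADO_FINAL
--     else:
--         return ESTADO_NO_FINAL
-- ===== SOURCE B (Python) =====
-- ESTADO_FINAL = "ESTADO FINAL"
--
-- ESTADO_NO_FINAL = "NO ACEPTADO"
--
-- ESTADO_TRAMPA = "EN ESTADO TRAMPA"
--
-- def espacio_en_blanco(lexema):
--     if not lexema:
--         return ESTADO_NO_FINAL
--     if set(lexema) <= {' ', '\t', '\n'}:
--         return ESTADO_FINAL
--     return ESTADO_TRAMPA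
-- ===== Notes on version B (the rewrite author's own statement) =====
-- stated objective: simpler
-- what changed: Replaced the per-character DFA transition loop (state, transition dict, early break) with an empty-string guard plus one subset test of set(lexema) against the literal set {' ','\t','\n'}.
import Mathlib
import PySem

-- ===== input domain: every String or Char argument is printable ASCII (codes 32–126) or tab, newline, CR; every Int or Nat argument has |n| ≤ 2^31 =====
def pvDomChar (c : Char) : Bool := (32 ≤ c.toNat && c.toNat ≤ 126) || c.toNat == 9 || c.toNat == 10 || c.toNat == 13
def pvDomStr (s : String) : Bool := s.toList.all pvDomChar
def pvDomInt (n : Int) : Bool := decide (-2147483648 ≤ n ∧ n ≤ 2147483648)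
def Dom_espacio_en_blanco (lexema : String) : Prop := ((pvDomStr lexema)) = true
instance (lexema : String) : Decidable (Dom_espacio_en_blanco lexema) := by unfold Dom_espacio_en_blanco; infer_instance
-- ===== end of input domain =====

-- B replaces A's per-character DFA transition loop by an empty-string guard plus one subset
-- test of the string's character set against {' ','\t','\n'} (objective: simpler).

-- ===== PORT A =====
-- delta = {0:{'\t':1,' ':1,'\n':1},1:{'\t':1,' ':1,'\n':1}}
def pvDelta : PySem.Dict Int (PySem.Dict Char Int) :=
  PySem.Dict.ofList [(0, PySem.Dict.ofList [('\t', 1), (' ', 1), ('\n', 1)]),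
                     (1, PySem.Dict.ofList [('\t', 1), (' ', 1), ('\n', 1)])]

-- A's for-loop with its early break; delta[estado] never raises a KeyError (estado is 0 or 1
-- whenever it is looked up), so the `none` arm of the outer lookup is unreachable
def pvLoopA (estado : Int) (cs : List Char) : Int :=
  match cs with
  | [] => estado
  | c :: rest =>
    match PySem.Dict.get? pvDelta estado with
    | some row =>
      if PySem.Dict.contains row c then
        pvLoopA (PySem.Dict.getD row c 0) rest
      else
        -1
    | none => -1

def espacio_en_blanco (lexema : String) : String :=
  let estado := pvLoopA 0 lexema.toList
  if estado = -1 then "EN ESTADO TRAMPA"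
  else if estado ∈ [(1 : Int)] then "ESTADO FINAL"
  else "NO ACEPTADO"

-- ===== PORT B =====
def espacio_en_blanco_alt (lexema : String) : String :=
  if lexema.toList = [] then "NO ACEPTADO"
  else if PySem.Set.issubset (PySem.Set.ofList lexema.toList) [' ', '\t', '\n'] then "ESTADO FINAL"
  else "EN ESTADO TRAMPA"

-- ===== PRECONDITION & SPEC =====
def Spec_espacio_en_blanco (lexema : String) (out : String) : Prop := out = espacio_en_blanco_alt lexema
instance (lexema : String) (out : String) : Decidable (Spec_espacio_en_blanco lexema out) := by unfold Spec_espacio_en_blanco; infer_instance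

-- ===== CLAIM (what is proved, stated in full; the proofs are below) =====
def Claim_equal_espacio_en_blanco : Prop := ∀ (lexema : String), Dom_espacio_en_blanco lexema → Spec_espacio_en_blanco lexema (espacio_en_blanco lexema)

-- ===== LEMMAS AND PROOFS =====

-- the (identical) transition row of both DFA states
def pvDeltaRow : PySem.Dict Char Int := PySem.Dict.ofList [('\t', 1), (' ', 1), ('\n', 1)]

theorem pvRow_contains_iff (c : Char) :
    PySem.Dict.contains pvDeltaRow c = true ↔ (c = '\t' ∨ c = ' ' ∨ c = '\n') := by
  simp [pvDeltaRow, PySem.Dict.ofList, PySem.Dict.update, PySem.Dict.contains_insert,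
    PySem.Dict.contains_empty]
  tauto

theorem pvRow_getD (c : Char) (h : c = '\t' ∨ c = ' ' ∨ c = '\n') :
    PySem.Dict.getD pvDeltaRow c 0 = 1 := by
  rcases h with h | h | h <;> subst h <;> decide

-- one loop iteration from either reachable state 0 or 1
theorem pvLoopA_step (s : Int) (hs : PySem.Dict.get? pvDelta s = some pvDeltaRow)
    (c : Char) (rest : List Char) :
    pvLoopA s (c :: rest) =
      if c = '\t' ∨ c = ' ' ∨ c = '\n' then pvLoopA 1 rest else -1 := by
  simp only [pvLoopA, hs]
  by_cases h : c = '\t' ∨ c = ' ' ∨ c = '\n'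
  · rw [if_pos ((pvRow_contains_iff c).mpr h), pvRow_getD c h, if_pos h]
  · rw [if_neg (by simpa [pvRow_contains_iff c] using h), if_neg h]

theorem pvLoopA_one (cs : List Char) :
    pvLoopA 1 cs = if ∀ c ∈ cs, c = '\t' ∨ c = ' ' ∨ c = '\n' then 1 else -1 := by
  induction cs with
  | nil => simp [pvLoopA]
  | cons c rest ih =>
    rw [pvLoopA_step 1 (by rfl) c rest, ih]
    by_cases hc : c = '\t' ∨ c = ' ' ∨ c = '\n' <;>
      by_cases hr : ∀ x ∈ rest, x = '\t' ∨ x = ' ' ∨ x = '\n' <;>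
      simp_all

-- ===== VERDICT (by name: the statement is the Claim_ definition above) =====
theorem espacio_en_blanco_spec : Claim_equal_espacio_en_blanco := by
  intro lexema _
  unfold Spec_espacio_en_blanco espacio_en_blanco espacio_en_blanco_alt
  cases h : lexema.toList with
  | nil => simp [pvLoopA]
  | cons c rest =>
    rw [pvLoopA_step 0 (by rfl) c rest, pvLoopA_one rest]
    have hsub : PySem.Set.issubset (PySem.Set.ofList (c :: rest)) [' ', '\t', '\n'] = true ↔
        ∀ x ∈ c :: rest, x = '\t' ∨ x = ' ' ∨ x = '\n' := by
      rw [PySem.Set.issubset_iff]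
      constructor
      · intro hq x hx
        have := hq x ((PySem.Set.mem_ofList _ x).mpr hx)
        simp only [List.mem_cons, List.not_mem_nil, or_false] at this
        tauto
      · intro hq x hx
        have := hq x ((PySem.Set.mem_ofList _ x).mp hx)
        simp only [List.mem_cons, List.not_mem_nil, or_false]
        tauto
    by_cases hall : ∀ x ∈ c :: rest, x = '\t' ∨ x = ' ' ∨ x = '\n'
    · have hc : c = '\t' ∨ c = ' ' ∨ c = '\n' := hall c (by simp)
      have hr : ∀ x ∈ rest, x = '\t' ∨ x = ' ' ∨ x = '\n' := fun x hx => hall x (by simp [hx])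
      rw [if_pos hc, if_pos hr]
      simp [hsub.mpr hall]
    · have hnot : ¬ (PySem.Set.issubset (PySem.Set.ofList (c :: rest)) [' ', '\t', '\n'] = true) :=
        fun hq => hall (hsub.mp hq)
      by_cases hc : c = '\t' ∨ c = ' ' ∨ c = '\n'
      · have hr : ¬ ∀ x ∈ rest, x = '\t' ∨ x = ' ' ∨ x = '\n' := by
          intro hr
          exact hall (by
            intro x hx
            rcases List.mem_cons.mp hx with rfl | hx
            · exact hc
            · exact hr x hx)
        rw [if_pos hc, if_neg hr]
        simp [hnot]
      · rw [if_neg hc]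
        simp [hnot]
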